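-- pv_equiv track=rewrite | github.com/wongzc/NUS_IT5001_PE_answer | solution/IT5001 2020_21 SEM1 PE.py | maxRotationalGoodMatch
-- ===== SOURCE A (Python) =====
-- def maxRotationalGoodMatch(fpp,mpp):
--     ans=0
--     l=len(fpp)
--     for i in range(l):
--         curr=0
--         for j in range(l):
--             curr+=(fpp[j]==mpp[(i+j)%l]) #the i is added after each full comparison
--         ans=max(ans,curr)
--     return ans
-- ===== SOURCE B (Python) =====
-- def maxRotationalGoodMatch(fpp, mpp):
--     l = len(fpp)
--     if l == 0:
--         return 0
--     m = mpp[:l]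
--     pos = {}
--     for pm, w in enumerate(m):
--         pos.setdefault(w, []).append(pm)
--     hist = [0] * l
--     for pf, v in enumerate(fpp):
--         for pm in pos.get(v, []):
--             hist[(pm - pf) % l] += 1
--     return max(hist)
-- ===== Notes on version B (the rewrite author's own statement) =====
-- stated objective: faster
-- what changed: Instead of recomputing the match count for every rotation with a nested scan, B buckets the positions of each value of mpp[:l] in one dict pass and scatters each equal-value position pair (pf,pm) into a histogram at shift (pm-pf)%l, then returns the histogram's maximum.
import Mathlib
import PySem

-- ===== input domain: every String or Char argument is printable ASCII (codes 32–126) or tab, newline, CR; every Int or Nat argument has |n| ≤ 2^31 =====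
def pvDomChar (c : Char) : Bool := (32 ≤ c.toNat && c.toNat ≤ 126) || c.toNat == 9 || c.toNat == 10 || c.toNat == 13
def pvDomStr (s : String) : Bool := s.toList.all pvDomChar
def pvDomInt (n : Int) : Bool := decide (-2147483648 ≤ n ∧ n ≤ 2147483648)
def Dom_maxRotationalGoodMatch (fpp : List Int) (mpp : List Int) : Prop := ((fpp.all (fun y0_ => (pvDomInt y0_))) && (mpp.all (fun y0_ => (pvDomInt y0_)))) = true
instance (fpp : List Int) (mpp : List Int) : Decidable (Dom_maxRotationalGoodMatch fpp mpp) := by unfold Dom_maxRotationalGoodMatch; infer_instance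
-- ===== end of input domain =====

-- B replaces the per-rotation rescan by one dict pass that buckets positions of each value of
-- mpp[:l] and scatters each equal-value pair into a histogram of rotation shifts (objective: faster).

-- ===== PORT A =====
def maxRotationalGoodMatch (fpp : List Int) (mpp : List Int) : Int :=
  let l : Int := (fpp.length : Int)
  (PySem.List.pyRange 0 l 1).foldl
    (fun ans i =>
      let curr :=
        (PySem.List.pyRange 0 l 1).foldl
          (fun curr j =>
            curr + (if PySem.List.pyGetD fpp j 0 = PySem.List.pyGetD mpp (PySem.Int.mod (i + j) l) 0 then 1 else 0))
          0
      max ans curr)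
    0

-- ===== PORT B =====
def maxRotationalGoodMatch_alt (fpp : List Int) (mpp : List Int) : Int :=
  let l : Int := (fpp.length : Int)
  if l = 0 then 0
  else
    let m := PySem.List.slice mpp none (some l)
    let pos : PySem.Dict Int (List Int) :=
      (PySem.List.enumerate m).foldl (fun d p => d.modify p.2 [] (fun ps => ps ++ [p.1])) PySem.Dict.empty
    let hist :=
      (PySem.List.enumerate fpp).foldl
        (fun h p =>
          (pos.getD p.2 []).foldl
            (fun h pm =>
              PySem.List.pySetD h (PySem.Int.mod (pm - p.1) l)
                (PySem.List.pyGetD h (PySem.Int.mod (pm - p.1) l) 0 + 1))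
            h)
        (PySem.List.pyRepeat [0] l)
    -- here l > 0, so hist ≠ [] and Python's max(hist) returns; the .getD 0 default is never taken
    (PySem.List.max? hist (fun x => x)).getD 0

-- ===== PRECONDITION & SPEC =====
-- Pre_ excludes exactly the inputs where A raises IndexError: 0 < len(fpp) with mpp shorter than fpp.
def Pre_maxRotationalGoodMatch (fpp : List Int) (mpp : List Int) : Prop := fpp.length ≤ mpp.length
instance (fpp : List Int) (mpp : List Int) : Decidable (Pre_maxRotationalGoodMatch fpp mpp) := by unfold Pre_maxRotationalGoodMatch; infer_instance
def pvWitness_maxRotationalGoodMatch : List Int × List Int := ([1, 2], [2, 1])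

def Spec_maxRotationalGoodMatch (fpp : List Int) (mpp : List Int) (out : Int) : Prop := out = maxRotationalGoodMatch_alt fpp mpp
instance (fpp : List Int) (mpp : List Int) (out : Int) : Decidable (Spec_maxRotationalGoodMatch fpp mpp out) := by unfold Spec_maxRotationalGoodMatch; infer_instance

-- ===== CLAIM (what is proved, stated in full; the proofs are below) =====
def Claim_equal_maxRotationalGoodMatch : Prop := ∀ (fpp : List Int) (mpp : List Int), Dom_maxRotationalGoodMatch fpp mpp → Pre_maxRotationalGoodMatch fpp mpp → Spec_maxRotationalGoodMatch fpp mpp (maxRotationalGoodMatch fpp mpp)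

-- ===== LEMMAS AND PROOFS =====

-- the per-rotation match count both programs compute
def pvCnt (fpp mpp : List Int) (n k : Nat) : Int :=
  ((List.range n).countP (fun j => decide (fpp.getD j 0 = mpp.getD ((k + j) % n) 0)) : Int)

lemma pv_modshift (n t j k : Nat) (ht : t < n) (hk : k < n) :
    PySem.Int.mod ((t : Int) - (j : Int)) (n : Int) = (k : Int) ↔ t = (k + j) % n := by
  have hn : (0 : Int) < (n : Int) := by exact_mod_cast Nat.pos_of_ne_zero (by omega : n ≠ 0)
  rw [PySem.Int.mod_eq_emod_of_pos hn]
  have hkk : (k : Int) % n = k := Int.emod_eq_of_lt (by positivity) (by exact_mod_cast hk)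
  have htt : (t : Int) % n = t := Int.emod_eq_of_lt (by positivity) (by exact_mod_cast ht)
  have hcast : (((k + j) % n : Nat) : Int) = ((k : Int) + j) % n := by
    push_cast [Int.natCast_mod]; ring_nf
  constructor
  · intro h
    have hmod : ((t : Int) - j) ≡ (k : Int) [ZMOD (n : Int)] := by
      unfold Int.ModEq; rw [h, hkk]
    have hmod2 : (t : Int) ≡ (k : Int) + j [ZMOD (n : Int)] := by
      simpa using hmod.add_right (j : Int)
    have h3 : (t : Int) = (((k + j) % n : Nat) : Int) := by
      rw [hcast, ← htt]; exact hmod2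
    exact_mod_cast h3
  · intro h
    have hmod2 : (t : Int) ≡ (k : Int) + j [ZMOD (n : Int)] := by
      unfold Int.ModEq
      rw [htt, h, hcast]
    have hmod : ((t : Int) - j) ≡ (k : Int) [ZMOD (n : Int)] := by
      simpa using hmod2.sub_right (j : Int)
    unfold Int.ModEq at hmod
    rw [hmod, hkk]

lemma pv_countP_range_single (n t0 : Nat) (ht : t0 < n) (q : Nat → Bool) :
    (List.range n).countP (fun t => decide (t = t0) && q t) = if q t0 then 1 else 0 := by
  induction n with
  | zero => omega
  | succ n ih =>
    rw [List.range_succ, List.countP_append]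
    by_cases h : t0 = n
    · subst h
      have : (List.range t0).countP (fun t => decide (t = t0) && q t) = 0 := by
        apply List.countP_eq_zero.mpr
        intro t htm
        have := List.mem_range.mp htm
        simp [show t ≠ t0 by omega]
      simp [this, List.countP_cons]
    · have hlt : t0 < n := by omega
      rw [ih hlt]
      have : (List.countP (fun t => decide (t = t0) && q t) [n]) = 0 := by
        simp [show ¬ (n = t0) by omega]
      omega

lemma pv_incFold_length (g : Int → Int) (ps : List Int) (h : List Int) :
    (ps.foldl (fun h pm => PySem.List.pySetD h (g pm) (PySem.List.pyGetD h (g pm) 0 + 1)) h).length = h.length := by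
  induction ps generalizing h with
  | nil => rfl
  | cons pm rest ih => rw [List.foldl_cons, ih, PySem.List.length_pySetD]

lemma pv_incFold_getD (g : Int → Int) (ps : List Int) (h : List Int)
    (hb : ∀ pm ∈ ps, 0 ≤ g pm ∧ g pm < (h.length : Int)) (k : Nat) :
    (ps.foldl (fun h pm => PySem.List.pySetD h (g pm) (PySem.List.pyGetD h (g pm) 0 + 1)) h).getD k 0
      = h.getD k 0 + ((ps.countP (fun pm => g pm == (k : Int))) : Int) := by
  induction ps generalizing h with
  | nil => simp
  | cons pm rest ih =>
    rw [List.foldl_cons]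
    obtain ⟨h0, h1⟩ := hb pm (by simp)
    set e := g pm with he
    have het : e.toNat < h.length := by omega
    have hset : PySem.List.pySetD h e (PySem.List.pyGetD h e 0 + 1)
        = h.set e.toNat (PySem.List.pyGetD h e 0 + 1) := PySem.List.pySetD_of_nonneg h _ h0
    have hlen' : (h.set e.toNat (PySem.List.pyGetD h e 0 + 1)).length = h.length := by simp
    rw [hset, ih _ (fun x hx => by rw [hlen']; exact hb x (List.mem_cons_of_mem _ hx))]
    have hget : PySem.List.pyGetD h e 0 = h.getD e.toNat 0 := by
      rw [PySem.List.pyGetD_eq_getElem h 0 h0 h1, List.getD_eq_getElem h 0 het]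
    rw [List.countP_cons]
    by_cases hek : e.toNat = k
    · have heq : g pm = (k : Int) := by rw [← he]; omega
      have hD : (h.set e.toNat (PySem.List.pyGetD h e 0 + 1)).getD k 0 = PySem.List.pyGetD h e 0 + 1 := by
        rw [List.getD_eq_getElem _ 0 (by omega : k < (h.set e.toNat _).length)]
        rw [List.getElem_set]
        simp [hek]
      rw [hD, hget, hek]
      simp [heq]
      ring
    · have : (h.set e.toNat (PySem.List.pyGetD h e 0 + 1)).getD k 0 = h.getD k 0 := by
        by_cases hkl : k < h.length
        · rw [List.getD_eq_getElem _ 0 (by omega : k < (h.set e.toNat _).length),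
              List.getD_eq_getElem h 0 hkl, List.getElem_set]
          simp [hek]
        · rw [List.getD_eq_default _ 0 (by omega), List.getD_eq_default _ 0 (by omega)]
      rw [this]
      have hne : ¬ (g pm == (k : Int)) = true := by
        simp only [beq_iff_eq]; rw [← he]; omega
      simp [hne]

lemma pv_histFold_length (P : Int → List Int) (n : Nat) (pairs : List (Int × Int)) (h : List Int) :
    (pairs.foldl (fun h p => (P p.2).foldl
        (fun h pm => PySem.List.pySetD h (PySem.Int.mod (pm - p.1) (n : Int))
          (PySem.List.pyGetD h (PySem.Int.mod (pm - p.1) (n : Int)) 0 + 1)) h) h).length = h.length := by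
  induction pairs generalizing h with
  | nil => rfl
  | cons p rest ih =>
    rw [List.foldl_cons, ih]
    exact pv_incFold_length (fun pm => PySem.Int.mod (pm - p.1) (n : Int)) (P p.2) h

lemma pv_histFold_getD (P : Int → List Int) (n : Nat) (hn : 0 < n)
    (pairs : List (Int × Int)) (h : List Int) (hlen : h.length = n) (k : Nat) :
    (pairs.foldl (fun h p => (P p.2).foldl
        (fun h pm => PySem.List.pySetD h (PySem.Int.mod (pm - p.1) (n : Int))
          (PySem.List.pyGetD h (PySem.Int.mod (pm - p.1) (n : Int)) 0 + 1)) h) h).getD k 0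
      = h.getD k 0 + (pairs.map (fun p =>
          (((P p.2).countP (fun pm => PySem.Int.mod (pm - p.1) (n : Int) == (k : Int))) : Int))).sum := by
  have hnI : (0 : Int) < (n : Int) := by exact_mod_cast hn
  induction pairs generalizing h with
  | nil => simp
  | cons p rest ih =>
    rw [List.foldl_cons]
    have hb : ∀ pm ∈ P p.2, 0 ≤ PySem.Int.mod (pm - p.1) (n : Int)
        ∧ PySem.Int.mod (pm - p.1) (n : Int) < (h.length : Int) := by
      intro pm _
      exact ⟨PySem.Int.mod_nonneg _ hnI, by rw [hlen]; exact PySem.Int.mod_lt _ hnI⟩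
    have hlen' := pv_incFold_length (fun pm => PySem.Int.mod (pm - p.1) (n : Int)) (P p.2) h
    rw [ih _ (by rw [hlen']; exact hlen)]
    rw [pv_incFold_getD (fun pm => PySem.Int.mod (pm - p.1) (n : Int)) (P p.2) h hb k]
    simp
    ring

lemma pv_pos_getD (m : List Int) (v : Int) :
    ((PySem.List.enumerate m).foldl (fun d p => d.modify p.2 [] (fun ps => ps ++ [p.1])) PySem.Dict.empty).getD v []
      = ((PySem.List.enumerate m).filter (fun p => p.2 == v)).map (fun p => p.1) := by
  have h1 : (PySem.List.enumerate m).foldl (fun d p => d.modify p.2 [] (fun ps => ps ++ [p.1])) PySem.Dict.empty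
      = ((PySem.List.enumerate m).map (fun p => (p.2, p.1))).foldl
          (fun d p => d.modify p.1 [] (fun ps => ps ++ [p.2])) PySem.Dict.empty := by
    rw [List.foldl_map]
  rw [h1, PySem.Dict.getD_foldl_modify_append]
  simp [List.filter_map, Function.comp_def]

lemma pv_term_eq (fpp mpp : List Int) (n j k : Nat) (hn : 0 < n) (_hj : j < n) (hk : k < n)
    (hpre : n ≤ mpp.length) :
    ((((PySem.List.enumerate (mpp.take n)).filter (fun p => p.2 == fpp.getD j 0)).map (fun p => p.1)).countP
        (fun pm => PySem.Int.mod (pm - (j : Int)) (n : Int) == (k : Int)))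
      = if fpp.getD j 0 = mpp.getD ((k + j) % n) 0 then 1 else 0 := by
  set v := fpp.getD j 0 with hv
  have hmlen : (mpp.take n).length = n := by simp [hpre]
  have ht0 : (k + j) % n < n := Nat.mod_lt _ hn
  rw [List.countP_map, List.countP_filter]
  rw [PySem.List.enumerate_eq_map_pyRange (mpp.take n) 0, List.countP_map]
  rw [PySem.List.pyRange_one, List.countP_map]
  have hlen' : ((PySem.List.len (mpp.take n) : Int) - 0).toNat = n := by
    simp [PySem.List.len, hmlen]
  rw [hlen']
  calc (List.range n).countP _
      = (List.range n).countP (fun t => decide (t = (k + j) % n) && ((mpp.take n).getD t 0 == v)) := by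
        apply List.countP_congr
        intro t htm
        have ht : t < n := List.mem_range.mp htm
        simp only [Function.comp_def, zero_add, PySem.List.pyGetD_natCast]
        have hb : (PySem.Int.mod ((t:Int) - (j:Int)) (n:Int) == ((k:Nat):Int)) = decide (t = (k + j) % n) := by
          rw [Bool.eq_iff_iff]
          simp only [beq_iff_eq, decide_eq_true_eq]
          exact pv_modshift n t j k ht hk
        rw [hb]
    _ = if ((mpp.take n).getD ((k + j) % n) 0 == v) then 1 else 0 := pv_countP_range_single n _ ht0 _
    _ = if v = mpp.getD ((k + j) % n) 0 then 1 else 0 := by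
        have hgd : (mpp.take n).getD ((k + j) % n) 0 = mpp.getD ((k + j) % n) 0 := by
          rw [List.getD_eq_getElem?_getD, List.getD_eq_getElem?_getD, List.getElem?_take_of_lt ht0]
        rw [hgd]
        simp only [beq_iff_eq]
        by_cases hE : v = mpp.getD ((k + j) % n) 0
        · rw [if_pos hE.symm, if_pos hE]
        · have hE' : ¬ (mpp.getD ((k + j) % n) 0 = v) := fun h => hE h.symm
          rw [if_neg hE', if_neg hE]

lemma pv_A_inner (fpp mpp : List Int) (n i : Nat) :
    (PySem.List.pyRange 0 (n : Int) 1).foldl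
        (fun curr j => curr + (if PySem.List.pyGetD fpp j 0 = PySem.List.pyGetD mpp (PySem.Int.mod ((i : Int) + j) (n : Int)) 0 then 1 else 0)) 0
      = pvCnt fpp mpp n i := by
  rw [PySem.List.pyRange_one, show ((n:Int) - 0).toNat = n from by simp, List.foldl_map]
  have step := PySem.List.foldl_congr_mem
    (l := List.range n) (init := (0:Int))
    (f := fun curr t => curr + (if PySem.List.pyGetD fpp ((0:Int) + (t:Nat)) 0 = PySem.List.pyGetD mpp (PySem.Int.mod ((i:Int) + ((0:Int) + (t:Nat))) (n:Int)) 0 then 1 else 0))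
    (g := fun curr t => if (fpp.getD t 0 = mpp.getD ((i + t) % n) 0) then curr + 1 else curr)
    (by
      intro curr t _
      have hmod : PySem.Int.mod ((i:Int) + (t:Int)) (n:Int) = (((i + t) % n : Nat) : Int) := by
        rw [← Nat.cast_add, PySem.Int.mod_natCast]
      simp only [zero_add, PySem.List.pyGetD_natCast, hmod]
      split_ifs with h
      · rfl
      · ring)
  rw [step, PySem.List.foldl_ite_add_one]
  simp [pvCnt]

lemma pv_A_eq (fpp mpp : List Int) :
    maxRotationalGoodMatch fpp mpp
      = ((List.range fpp.length).map (fun i => pvCnt fpp mpp fpp.length i)).foldl max 0 := by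
  show ((PySem.List.pyRange 0 (fpp.length : Int) 1).foldl
    (fun ans i => max ans ((PySem.List.pyRange 0 (fpp.length : Int) 1).foldl
      (fun curr j => curr + (if PySem.List.pyGetD fpp j 0 = PySem.List.pyGetD mpp (PySem.Int.mod (i + j) (fpp.length : Int)) 0 then 1 else 0)) 0)) 0) = _
  have step1 := PySem.List.foldl_congr_mem
    (l := PySem.List.pyRange 0 (fpp.length : Int) 1) (init := (0:Int))
    (f := fun ans i' => max ans ((PySem.List.pyRange 0 (fpp.length : Int) 1).foldl
        (fun curr j => curr + (if PySem.List.pyGetD fpp j 0 = PySem.List.pyGetD mpp (PySem.Int.mod (i' + j) (fpp.length : Int)) 0 then 1 else 0)) 0))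
    (g := fun ans i' => max ans (pvCnt fpp mpp fpp.length i'.toNat))
    (by
      intro ans i' hi
      beta_reduce
      have hb := PySem.List.mem_pyRange_one.mp hi
      have hi' : i' = ((i'.toNat : Nat) : Int) := by omega
      conv_lhs => rw [hi']
      rw [pv_A_inner fpp mpp fpp.length i'.toNat])
  rw [step1]
  rw [PySem.List.pyRange_one, show ((fpp.length:Int) - 0).toNat = fpp.length from by simp, List.foldl_map, List.foldl_map]
  have step2 := PySem.List.foldl_congr_mem
    (l := List.range fpp.length) (init := (0:Int))
    (f := fun ans t => max ans (pvCnt fpp mpp fpp.length ((0:Int) + (t:Nat)).toNat))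
    (g := fun ans t => max ans (pvCnt fpp mpp fpp.length t))
    (by intro ans t _; beta_reduce; simp)
  rw [step2]

lemma pv_B_eq (fpp mpp : List Int) (hn : 0 < fpp.length) (hpre : fpp.length ≤ mpp.length) :
    maxRotationalGoodMatch_alt fpp mpp
      = ((List.range fpp.length).map (fun i => pvCnt fpp mpp fpp.length i)).foldl max 0 := by
  have hne : ¬ ((fpp.length : Int) = 0) := by
    rw [Int.natCast_eq_zero]; omega
  simp only [maxRotationalGoodMatch_alt]
  rw [if_neg hne]
  set n := fpp.length with hnn
  set m := PySem.List.slice mpp none (some (n : Int)) with hm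
  have hmtake : m = mpp.take n := by
    rw [hm, PySem.List.slice_to_natCast]
  set pos := (PySem.List.enumerate m).foldl (fun d p => d.modify p.2 [] (fun ps => ps ++ [p.1])) PySem.Dict.empty with hposd
  set histF := (PySem.List.enumerate fpp).foldl
      (fun h p => (pos.getD p.2 []).foldl
        (fun h pm => PySem.List.pySetD h (PySem.Int.mod (pm - p.1) (n : Int))
          (PySem.List.pyGetD h (PySem.Int.mod (pm - p.1) (n : Int)) 0 + 1)) h)
      (PySem.List.pyRepeat [(0:Int)] (n : Int)) with hhist
  have hrep : PySem.List.pyRepeat [(0:Int)] (n : Int) = List.replicate n (0:Int) := by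
    rw [PySem.List.pyRepeat_singleton]; simp
  have hlen : histF.length = n := by
    rw [hhist, hrep]
    have := pv_histFold_length (fun v => pos.getD v []) n (PySem.List.enumerate fpp) (List.replicate n (0:Int))
    simpa using this
  have hget : ∀ k, k < n → histF.getD k 0 = pvCnt fpp mpp n k := by
    intro k hk
    rw [hhist, hrep]
    have h1 := pv_histFold_getD (fun v => pos.getD v []) n hn (PySem.List.enumerate fpp) (List.replicate n (0:Int)) (by simp) k
    rw [h1]
    have hmap1 : ∀ p ∈ PySem.List.enumerate fpp,
        ((((pos.getD p.2 []).countP (fun pm => PySem.Int.mod (pm - p.1) (n:Int) == (k:Int))) : Nat) : Int)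
        = ((((((PySem.List.enumerate (mpp.take n)).filter (fun q => q.2 == p.2)).map (fun q => q.1)).countP
            (fun pm => PySem.Int.mod (pm - p.1) (n:Int) == (k:Int))) : Nat) : Int) := by
      intro p _
      rw [hposd, pv_pos_getD, hmtake]
    rw [List.map_congr_left hmap1]
    have henum : PySem.List.enumerate fpp = (List.range n).map (fun (j : Nat) => ((j:Int), fpp.getD j 0)) := by
      rw [PySem.List.enumerate_eq_map_pyRange fpp 0, PySem.List.pyRange_one, List.map_map]
      have hl : ((PySem.List.len fpp : Int) - 0).toNat = n := by
        simp [PySem.List.len]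
        exact hnn.symm
      rw [hl]
      apply List.map_congr_left
      intro t _
      simp
    rw [henum, List.map_map]
    have hmap2 : ∀ j ∈ List.range n,
        ((fun p => ((((((PySem.List.enumerate (mpp.take n)).filter (fun q => q.2 == p.2)).map (fun q => q.1)).countP
            (fun pm => PySem.Int.mod (pm - p.1) (n:Int) == (k:Int))) : Nat) : Int)) ∘ (fun (j : Nat) => ((j:Int), fpp.getD j 0))) j
        = if decide (fpp.getD j 0 = mpp.getD ((k + j) % n) 0) = true then (1:Int) else 0 := by
      intro j hj
      have hjn : j < n := List.mem_range.mp hj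
      simp only [Function.comp_def]
      rw [pv_term_eq fpp mpp n j k hn hjn hk hpre]
      split_ifs <;> simp_all
    rw [List.map_congr_left hmap2, PySem.List.sum_map_ite_one_zero]
    simp [pvCnt]
  have hlist : histF = (List.range n).map (fun k => pvCnt fpp mpp n k) := by
    apply List.ext_getElem
    · simp [hlen]
    · intro k h1 h2
      have hk : k < n := by rw [hlen] at h1; exact h1
      have hg := hget k hk
      rw [List.getD_eq_getElem _ 0 h1] at hg
      rw [hg]
      simp
  rw [hlist]
  obtain ⟨n', hn'⟩ := Nat.exists_eq_succ_of_ne_zero (by omega : n ≠ 0)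
  rw [hn', List.range_succ_eq_map, List.map_cons, PySem.List.max?_id_cons, Option.getD_some, List.foldl_cons]
  have h0 : (0:Int) ≤ pvCnt fpp mpp (n' + 1) 0 := Int.natCast_nonneg _
  rw [max_eq_right h0]

-- ===== VERDICT (by name: the statement is the Claim_ definition above) =====
theorem maxRotationalGoodMatch_spec : Claim_equal_maxRotationalGoodMatch := by
  intro fpp mpp _ hpre
  unfold Spec_maxRotationalGoodMatch
  rcases Nat.eq_zero_or_pos fpp.length with h0 | hpos
  · have : fpp = [] := List.length_eq_zero_iff.mp h0
    subst this
    simp [maxRotationalGoodMatch, maxRotationalGoodMatch_alt]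
  · rw [pv_A_eq, pv_B_eq fpp mpp hpos hpre]
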